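-- pv_equiv track=rewrite | github.com/xisisu/projects.python | Train_to_busan/main.py | get_edge_value
-- ===== SOURCE A (Python) =====
-- def get_edge_value(line_names):
--   names_to_edge = {}
--   for line in line_names:
--     for k in line:
--       for v in line:
--         if names_to_edge.get(k) == None:
--           names_to_edge[k] = {}
--         if names_to_edge[k].get(v) == None:
--           names_to_edge[k][v] = 0
--         names_to_edge[k][v] += 1
--   return names_to_edge
-- ===== SOURCE B (Python) =====
-- def get_edge_value(line_names):
--   names_to_edge = {}
--   for line in line_names:
--     freq = {}
--     for name in line:
--       freq[name] = freq.get(name, 0) + 1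
--     for k, ck in freq.items():
--       row = names_to_edge.get(k, {})
--       for v, cv in freq.items():
--         row[v] = row.get(v, 0) + ck * cv
--       names_to_edge[k] = row
--   return names_to_edge
-- ===== Notes on version B (the rewrite author's own statement) =====
-- stated objective: faster
-- what changed: Per line, B builds a frequency map in one pass and adds freq[k]*freq[v] for each distinct pair of names instead of A's scan over every ordered pair of positions (with per-pair dict guards).
import Mathlib
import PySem

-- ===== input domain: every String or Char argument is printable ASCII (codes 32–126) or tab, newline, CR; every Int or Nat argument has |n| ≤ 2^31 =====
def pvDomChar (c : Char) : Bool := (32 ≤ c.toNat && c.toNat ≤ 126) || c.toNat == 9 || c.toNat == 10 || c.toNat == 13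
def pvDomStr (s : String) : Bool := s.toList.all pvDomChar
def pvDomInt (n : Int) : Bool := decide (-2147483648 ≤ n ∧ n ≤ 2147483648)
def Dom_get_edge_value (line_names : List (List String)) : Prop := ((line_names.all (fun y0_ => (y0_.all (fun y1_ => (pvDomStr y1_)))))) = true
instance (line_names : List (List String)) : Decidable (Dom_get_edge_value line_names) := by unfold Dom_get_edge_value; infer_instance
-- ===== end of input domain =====

-- B replaces A's quadratic scan over every ordered pair of positions in a line by a per-line
-- frequency map whose outer product (freq[k]*freq[v], each distinct pair once) is accumulated;
-- objective: faster (one pass per line plus distinct-pair work instead of all position pairs).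

-- ===== PORT A =====
-- one execution of A's inner-loop body: the two get()==None guards, then names_to_edge[k][v] += 1
def pvIncA (d : PySem.Dict String (PySem.Dict String Int)) (k v : String) :
    PySem.Dict String (PySem.Dict String Int) :=
  let d1 := if d.get? k = none then d.insert k PySem.Dict.empty else d
  let row := d1.getD k PySem.Dict.empty
  let row1 := if row.get? v = none then row.insert v 0 else row
  d1.insert k (row1.insert v (row1.getD v 0 + 1))

-- A's body for one line: for k in line: for v in line: …
def pvLineA (d : PySem.Dict String (PySem.Dict String Int)) (line : List String) :
    PySem.Dict String (PySem.Dict String Int) :=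
  line.foldl (fun d k => line.foldl (fun d v => pvIncA d k v) d) d

def get_edge_value (line_names : List (List String)) : List (String × List (String × Int)) :=
  ((line_names.foldl pvLineA PySem.Dict.empty).items).map (fun p => (p.1, p.2.items))

-- ===== PORT B =====
-- B's body for one line: build freq, then add freq[k]*freq[v] for every distinct pair
def pvLineB (d : PySem.Dict String (PySem.Dict String Int)) (line : List String) :
    PySem.Dict String (PySem.Dict String Int) :=
  let freq : PySem.Dict String Int :=
    line.foldl (fun f x => f.insert x (f.getD x 0 + 1)) PySem.Dict.empty
  freq.items.foldl (fun d p =>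
    let row := d.getD p.1 PySem.Dict.empty
    let row := freq.items.foldl (fun r q => r.insert q.1 (r.getD q.1 0 + p.2 * q.2)) row
    d.insert p.1 row) d

def get_edge_value_alt (line_names : List (List String)) : List (String × List (String × Int)) :=
  ((line_names.foldl pvLineB PySem.Dict.empty).items).map (fun p => (p.1, p.2.items))

-- ===== PRECONDITION & SPEC =====
def Spec_get_edge_value (line_names : List (List String)) (out : List (String × List (String × Int))) : Prop := out = get_edge_value_alt line_names
instance (line_names : List (List String)) (out : List (String × List (String × Int))) : Decidable (Spec_get_edge_value line_names out) := by unfold Spec_get_edge_value; infer_instance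

-- ===== CLAIM (what is proved, stated in full; the proofs are below) =====
def Claim_equal_get_edge_value : Prop := ∀ (line_names : List (List String)), Dom_get_edge_value line_names → Spec_get_edge_value line_names (get_edge_value line_names)

-- ===== LEMMAS AND PROOFS =====

-- A's guarded increment is a plain "insert the bumped row"
theorem pvIncA_eq (d : PySem.Dict String (PySem.Dict String Int)) (k v : String) :
    pvIncA d k v = d.insert k ((d.getD k PySem.Dict.empty).insert v
      ((d.getD k PySem.Dict.empty).getD v 0 + 1)) := by
  unfold pvIncA
  by_cases h : d.get? k = none
  · have hg : d.getD k PySem.Dict.empty = PySem.Dict.empty :=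
      PySem.Dict.getD_of_get?_eq_none d _ h
    rw [if_pos h]
    simp only [hg, PySem.Dict.getD_insert_self]
    simp [PySem.Dict.get?_empty, PySem.Dict.getD_insert_self, PySem.Dict.getD_empty,
      PySem.Dict.insert_insert_self]
  · obtain ⟨r, hr⟩ := Option.ne_none_iff_exists'.mp h
    have hg : d.getD k PySem.Dict.empty = r := PySem.Dict.getD_of_get?_eq_some _ _ hr
    rw [if_neg h]
    simp only [hg]
    by_cases hv : r.get? v = none
    · rw [if_pos hv]
      simp [PySem.Dict.getD_insert_self, PySem.Dict.insert_insert_self,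
        PySem.Dict.getD_of_get?_eq_none r _ hv]
    · rw [if_neg hv]

-- re-inserting the value already stored at k is the identity (keys unique)
theorem insert_self_of_get? (d : PySem.Dict String (PySem.Dict String Int))
    (k : String) (r : PySem.Dict String Int)
    (hnd : d.keys.Nodup) (hr : d.get? k = some r) : d.insert k r = d := by
  apply PySem.Dict.ext
  have hc : d.contains k = true := by
    rw [PySem.Dict.contains_eq_isSome_get?, hr]; rfl
  rw [PySem.Dict.items_insert_of_contains _ _ hc]
  have hcong : ∀ p ∈ d.items, (if (p.1 == k) = true then (k, r) else p) = p := by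
    intro p hp
    obtain ⟨pk, pv⟩ := p
    by_cases hk : pk = k
    · subst hk
      have hi : d.get? pk = some pv := PySem.Dict.get?_of_mem_items d hp hnd
      rw [hi] at hr
      simp [(Option.some.inj hr).symm]
    · simp [hk]
  rw [List.map_congr_left hcong, List.map_id']

-- per-line row accumulator of A (add 1 per occurrence)
def pvRowF (line : List String) (r : PySem.Dict String Int) : PySem.Dict String Int :=
  line.foldl (fun r v => r.insert v (r.getD v 0 + 1)) r

-- A's inner loop, when k is already present with row r
theorem innerA_contains (k : String) (rest : List String) :
    ∀ (d : PySem.Dict String (PySem.Dict String Int)) (r : PySem.Dict String Int),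
      d.keys.Nodup → d.get? k = some r →
      rest.foldl (fun d v => pvIncA d k v) d = d.insert k (pvRowF rest r) := by
  induction rest with
  | nil =>
    intro d r hnd hr
    simp only [List.foldl_nil, pvRowF]
    exact (insert_self_of_get? d k r hnd hr).symm
  | cons v rest ih =>
    intro d r hnd hr
    rw [List.foldl_cons, pvIncA_eq, PySem.Dict.getD_of_get?_eq_some _ _ hr]
    rw [ih (d.insert k (r.insert v (r.getD v 0 + 1))) (r.insert v (r.getD v 0 + 1))
        (PySem.Dict.nodup_keys_insert d k _ hnd) (PySem.Dict.get?_insert_self d k _)]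
    rw [PySem.Dict.insert_insert_self]
    rfl

-- A's inner loop over a NONEMPTY line, from any state
theorem innerA_full (k : String) (line : List String)
    (d : PySem.Dict String (PySem.Dict String Int))
    (hnd : d.keys.Nodup) (hne : line ≠ []) :
    line.foldl (fun d v => pvIncA d k v) d
      = d.insert k (pvRowF line (d.getD k PySem.Dict.empty)) := by
  cases line with
  | nil => exact absurd rfl hne
  | cons v rest =>
    rw [List.foldl_cons, pvIncA_eq]
    rw [innerA_contains k rest (d.insert k _) _
        (PySem.Dict.nodup_keys_insert d k _ hnd) (PySem.Dict.get?_insert_self d k _)]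
    rw [PySem.Dict.insert_insert_self]
    rfl

-- A's outer loop in row-update normal form
theorem outerA (line : List String) (ks : List String) :
    ∀ (d : PySem.Dict String (PySem.Dict String Int)), d.keys.Nodup → line ≠ [] →
      ks.foldl (fun d k => line.foldl (fun d v => pvIncA d k v) d) d
        = ks.foldl (fun d k => d.insert k (pvRowF line (d.getD k PySem.Dict.empty))) d := by
  induction ks with
  | nil => intro d _ _; rfl
  | cons k ks ih =>
    intro d hnd hne
    rw [List.foldl_cons, List.foldl_cons, innerA_full k line d hnd hne]
    exact ih _ (PySem.Dict.nodup_keys_insert d k _ hnd) hne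

-- the per-key row of a row-update loop is "iterate the update once per occurrence of the key"
theorem getD_outer (f : PySem.Dict String Int → String → PySem.Dict String Int)
    (ks : List String) (j : String) :
    ∀ (d : PySem.Dict String (PySem.Dict String Int)),
      (ks.foldl (fun d k => d.insert k (f (d.getD k PySem.Dict.empty) k)) d).getD j PySem.Dict.empty
        = (fun r => f r j)^[ks.count j] (d.getD j PySem.Dict.empty) := by
  induction ks with
  | nil => intro d; rfl
  | cons k ks ih =>
    intro d
    rw [List.foldl_cons, ih]
    by_cases hk : j = k
    · subst hk
      rw [PySem.Dict.getD_insert_self, List.count_cons_self, Function.iterate_succ_apply]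
    · rw [PySem.Dict.getD_insert, if_neg hk]
      rw [List.count_cons, if_neg (fun h => hk (eq_of_beq h).symm), Nat.add_zero]

-- Set facts used to align the key insertion orders
theorem set_update_ofList (s : PySem.Set String) (xs : List String) :
    PySem.Set.update s (PySem.Set.ofList xs) = PySem.Set.update s xs := by
  rw [PySem.Set.update_eq_append_filter, PySem.Set.update_eq_append_filter,
    PySem.Set.ofList_ofList]

theorem set_update_idem (s : PySem.Set String) (xs : List String) :
    PySem.Set.update (PySem.Set.update s xs) xs = PySem.Set.update s xs := by
  rw [PySem.Set.update_eq_append_filter (PySem.Set.update s xs) xs]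
  have h : List.filter (fun y => !(PySem.Set.update s xs).contains y) (PySem.Set.ofList xs) = [] := by
    rw [List.filter_eq_nil_iff]
    intro y hy
    have hyx : y ∈ xs := (PySem.Set.mem_ofList xs y).mp hy
    simp [PySem.Set.mem_update, hyx]
  rw [h, List.append_nil]

-- iterated pvRowF: values add m·count, keys update once
theorem rowF_iter_getD (line : List String) (m : Nat) :
    ∀ (r : PySem.Dict String Int) (w : String),
      ((pvRowF line)^[m] r).getD w 0 = r.getD w 0 + (m : Int) * (line.count w : Int) := by
  induction m with
  | zero => intro r w; simp
  | succ n ih =>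
    intro r w
    rw [Function.iterate_succ_apply, ih, pvRowF, PySem.Dict.getD_foldl_insert_add_one]
    push_cast; ring

theorem rowF_iter_keys (line : List String) (n : Nat) (r : PySem.Dict String Int) :
    ((pvRowF line)^[n + 1] r).keys = PySem.Set.update r.keys line := by
  induction n with
  | zero => exact PySem.Dict.keys_foldl_insert line _ r
  | succ n ih =>
    rw [Function.iterate_succ_apply' (pvRowF line) (n + 1) r, pvRowF,
      PySem.Dict.keys_foldl_insert, ih, set_update_idem]

-- B's per-line row update in closed form
def pvRowG (line : List String) (r : PySem.Dict String Int) (k : String) : PySem.Dict String Int :=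
  (PySem.Set.ofList line).foldl
    (fun r v => r.insert v (r.getD v 0 + (line.count k : Int) * (line.count v : Int))) r

-- B's loop body in row-update normal form
theorem lineB_norm (d : PySem.Dict String (PySem.Dict String Int)) (line : List String) :
    pvLineB d line
      = (PySem.Set.ofList line).foldl
          (fun d k => d.insert k (pvRowG line (d.getD k PySem.Dict.empty) k)) d := by
  unfold pvLineB pvRowG
  simp only [PySem.Dict.foldl_insert_getD_add_one_eq_counter, PySem.Dict.items_counter,
    List.foldl_map]

-- adding g v at each distinct v: values add count·g
theorem getD_foldl_insert_addc (g : String → Int) (L : List String) :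
    ∀ (r : PySem.Dict String Int) (w : String),
      (L.foldl (fun r v => r.insert v (r.getD v 0 + g v)) r).getD w 0
        = r.getD w 0 + (L.count w : Int) * g w := by
  induction L with
  | nil => intro r w; simp
  | cons v L ih =>
    intro r w
    rw [List.foldl_cons, ih]
    by_cases hw : w = v
    · subst hw
      rw [PySem.Dict.getD_insert_self, List.count_cons_self]
      push_cast; ring
    · rw [PySem.Dict.getD_insert, if_neg hw]
      rw [List.count_cons, if_neg (fun h => hw (eq_of_beq h).symm), Nat.add_zero]

-- the two per-line bodies agree on every well-formed state
theorem lineAB (line : List String) (d : PySem.Dict String (PySem.Dict String Int))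
    (hd : d.keys.Nodup) (hr : ∀ k, (d.getD k PySem.Dict.empty).keys.Nodup) :
    pvLineA d line = pvLineB d line := by
  by_cases hl : line = []
  · subst hl; rfl
  · rw [show pvLineA d line
        = line.foldl (fun d k => d.insert k (pvRowF line (d.getD k PySem.Dict.empty))) d
      from outerA line line d hd hl, lineB_norm]
    have keysA := PySem.Dict.keys_foldl_insert line
      (fun d k => pvRowF line (d.getD k PySem.Dict.empty)) d
    have keysB := PySem.Dict.keys_foldl_insert (PySem.Set.ofList line)
      (fun d k => pvRowG line (d.getD k PySem.Dict.empty) k) d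
    apply PySem.Dict.ext
    rw [PySem.Dict.items_eq_map_keys _ (by rw [keysA]; exact PySem.Set.nodup_update _ _ hd) PySem.Dict.empty,
      PySem.Dict.items_eq_map_keys _ (by rw [keysB]; exact PySem.Set.nodup_update _ _ hd) PySem.Dict.empty,
      keysA, keysB, set_update_ofList]
    apply List.map_congr_left
    intro k _
    refine Prod.ext rfl ?_
    show (line.foldl (fun d k => d.insert k (pvRowF line (d.getD k PySem.Dict.empty))) d).getD k PySem.Dict.empty
      = ((PySem.Set.ofList line).foldl (fun d k => d.insert k (pvRowG line (d.getD k PySem.Dict.empty) k)) d).getD k PySem.Dict.empty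
    rw [getD_outer (fun r _ => pvRowF line r) line k d,
      getD_outer (pvRowG line) (PySem.Set.ofList line) k d]
    by_cases hkl : k ∈ line
    · have hS : (PySem.Set.ofList line).count k = 1 :=
        List.count_eq_one_of_mem (PySem.Set.nodup_ofList line)
          ((PySem.Set.mem_ofList line k).mpr hkl)
      obtain ⟨n, hn⟩ := Nat.exists_eq_add_of_lt (List.count_pos_iff.mpr hkl)
      rw [hS, Function.iterate_one]
      apply PySem.Dict.ext
      have hndr : (d.getD k PySem.Dict.empty).keys.Nodup := hr k
      have kA : ((fun r => pvRowF line r)^[line.count k] (d.getD k PySem.Dict.empty)).keys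
          = PySem.Set.update (d.getD k PySem.Dict.empty).keys line := by
        rw [show line.count k = n + 1 by omega]
        exact rowF_iter_keys line n _
      have kB : (pvRowG line (d.getD k PySem.Dict.empty) k).keys
          = PySem.Set.update (d.getD k PySem.Dict.empty).keys line := by
        unfold pvRowG
        rw [PySem.Dict.keys_foldl_insert, set_update_ofList]
      rw [PySem.Dict.items_eq_map_keys _ (by rw [kA]; exact PySem.Set.nodup_update _ _ hndr) 0,
        PySem.Dict.items_eq_map_keys _ (by rw [kB]; exact PySem.Set.nodup_update _ _ hndr) 0,
        kA, kB]
      apply List.map_congr_left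
      intro w _
      refine Prod.ext rfl ?_
      show ((fun r => pvRowF line r)^[line.count k] (d.getD k PySem.Dict.empty)).getD w 0
        = (pvRowG line (d.getD k PySem.Dict.empty) k).getD w 0
      rw [rowF_iter_getD, pvRowG, getD_foldl_insert_addc]
      by_cases hwl : w ∈ line
      · rw [List.count_eq_one_of_mem (PySem.Set.nodup_ofList line)
          ((PySem.Set.mem_ofList line w).mpr hwl)]
        push_cast; ring
      · rw [List.count_eq_zero_of_not_mem hwl,
          List.count_eq_zero_of_not_mem (fun h => hwl ((PySem.Set.mem_ofList line w).mp h))]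
        push_cast; ring
    · rw [List.count_eq_zero_of_not_mem hkl,
        List.count_eq_zero_of_not_mem (fun h => hkl ((PySem.Set.mem_ofList line k).mp h))]
      rfl

-- iterating B's row update keeps row keys unique
theorem rowG_iter_nodup (line : List String) (k : String) (n : Nat) (r : PySem.Dict String Int)
    (h : r.keys.Nodup) : ((fun r => pvRowG line r k)^[n] r).keys.Nodup := by
  induction n with
  | zero => exact h
  | succ n ih =>
    rw [Function.iterate_succ_apply']
    unfold pvRowG
    rw [PySem.Dict.keys_foldl_insert]
    exact PySem.Set.nodup_update _ _ ih

-- invariant: well-formedness is preserved by B's body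
theorem inv_preserved (line : List String) (d : PySem.Dict String (PySem.Dict String Int))
    (hd : d.keys.Nodup) (hr : ∀ k, (d.getD k PySem.Dict.empty).keys.Nodup) :
    (pvLineB d line).keys.Nodup ∧
      ∀ k, ((pvLineB d line).getD k PySem.Dict.empty).keys.Nodup := by
  constructor
  · rw [lineB_norm, PySem.Dict.keys_foldl_insert]
    exact PySem.Set.nodup_update _ _ hd
  · intro k
    rw [lineB_norm, getD_outer (pvRowG line) (PySem.Set.ofList line) k d]
    exact rowG_iter_nodup line k _ _ (hr k)

-- the whole folds agree
theorem foldl_AB (ds : List (List String)) :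
    ∀ (d : PySem.Dict String (PySem.Dict String Int)), d.keys.Nodup →
      (∀ k, (d.getD k PySem.Dict.empty).keys.Nodup) →
      ds.foldl pvLineA d = ds.foldl pvLineB d := by
  induction ds with
  | nil => intro d _ _; rfl
  | cons line ds ih =>
    intro d hd hr
    rw [List.foldl_cons, lineAB line d hd hr, List.foldl_cons]
    exact ih _ (inv_preserved line d hd hr).1 (inv_preserved line d hd hr).2

-- ===== VERDICT (by name: the statement is the Claim_ definition above) =====
theorem get_edge_value_spec : Claim_equal_get_edge_value := by
  intro line_names _
  unfold Spec_get_edge_value get_edge_value get_edge_value_alt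
  rw [foldl_AB line_names PySem.Dict.empty (by simp [PySem.Dict.keys_empty])
    (fun k => by simp [PySem.Dict.getD_empty, PySem.Dict.keys_empty])]
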